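-- pv_equiv track=rewrite | github.com/mschnitzer/docstring-checker | source/docstring-checker/docstring-checker.py | func_reader
-- ===== SOURCE A (Python) =====
-- def func_reader(content):
-- 	"""
-- 	Parses the content of a file
-- 	:param str content: Content of a file
-- 	:return list: [functions_with_docstrings,functions_without_docstrings]
-- 	"""
--
-- 	# variables
-- 	currfunc = None
-- 	search_for_docstring = False
-- 	with_docstring = []
-- 	without_docstring = []
--
-- 	for line in content.split("\n"):
-- 		# remove whitespaces from the line
-- 		line = line.rstrip()
-- 		line = line.lstrip()
--
-- 		# split the line by whitespaces
-- 		parts = line.split(" ")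
--
-- 		if not search_for_docstring:
-- 			# search for 'def' at the beginning of the line
-- 			if parts[0] == 'def':
-- 				# the list 'parts' must have at least 2 elements (def and the name of the function)
-- 				if len(parts) >= 2:
-- 					# save the name of the current function
-- 					currfunc = parts[1]
--
-- 					# if there is a '(' after the function name (for the parameter list) just delete
-- 					# that shit
-- 					idx = currfunc.find("(")
-- 					if idx != -1:
-- 						currfunc = currfunc[:idx]
--
-- 					# jump into the 'search_for_docstring' state
-- 					search_for_docstring = True
-- 		else:
-- 			# check if this line is a docstring
-- 			# possibilities: """ or '''
-- 			if parts[0][:3] == '"""' or parts[0][:3] == "'''":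
-- 				with_docstring.append(currfunc)
-- 			else:
-- 				without_docstring.append(currfunc)
--
-- 			# reset our variables -> we'll search for a new function
-- 			currfunc = None
-- 			search_for_docstring = False
--
-- 	return [with_docstring, without_docstring]
-- ===== SOURCE B (Python) =====
-- def func_reader(content):
--     """Index-based single pass: each matched 'def' line is paired with the
--     immediately following line, which is classified as docstring or not."""
--     lines = content.split("\n")
--     with_docstring = []
--     without_docstring = []
--     i = 0
--     n = len(lines)
--     while i < n:
--         parts = lines[i].strip().split(" ")
--         if parts[0] == 'def' and len(parts) >= 2:
--             name = parts[1]
--             idx = name.find("(")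
--             if idx != -1:
--                 name = name[:idx]
--             if i + 1 < n:
--                 tok = lines[i + 1].strip().split(" ")[0][:3]
--                 if tok == '"""' or tok == "'''":
--                     with_docstring.append(name)
--                 else:
--                     without_docstring.append(name)
--                 i += 2
--             else:
--                 i += 1
--         else:
--             i += 1
--     return [with_docstring, without_docstring]
-- ===== Notes on version B (the rewrite author's own statement) =====
-- stated objective: alternative
-- what changed: A's boolean search_for_docstring state machine over the lines is replaced by an explicit index-based while loop that pairs each matched function-definition line directly with the immediately following line and jumps two lines ahead.
import Mathlib
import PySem

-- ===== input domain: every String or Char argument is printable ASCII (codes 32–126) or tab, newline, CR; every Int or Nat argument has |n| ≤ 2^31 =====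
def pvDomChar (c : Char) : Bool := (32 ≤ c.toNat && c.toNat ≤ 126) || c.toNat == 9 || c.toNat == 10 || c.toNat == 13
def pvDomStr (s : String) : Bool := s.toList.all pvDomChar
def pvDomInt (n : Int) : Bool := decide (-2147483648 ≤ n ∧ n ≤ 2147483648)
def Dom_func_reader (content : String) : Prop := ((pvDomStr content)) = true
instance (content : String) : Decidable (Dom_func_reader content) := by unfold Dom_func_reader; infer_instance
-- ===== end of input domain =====

-- B replaces A's boolean search_for_docstring state machine by an index-based single pass that
-- pairs each matched 'def' line directly with the immediately following line (objective: alternative decomposition).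

-- shared helper: Python's s.split(sep) for a non-empty separator
def pvSplit (s sep : String) : List String :=
  (PySem.Chars.splitOn s.toList sep.toList).map String.ofList

-- ===== PORT A =====
-- Python's currfunc starts as None and is only read while search_for_docstring is true,
-- when it always holds a string; the port keeps it as a String initialised to "".
def frA_step (st : String × Bool × List String × List String) (line : String) :
    String × Bool × List String × List String :=
  let line := PySem.Str.rstrip line
  let line := PySem.Str.lstrip line
  let parts := pvSplit line " "
  if !st.2.1 then
    if PySem.List.pyGetD parts 0 "" = "def" then
      if parts.length ≥ 2 then
        let currfunc := PySem.List.pyGetD parts 1 ""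
        let idx := PySem.Str.find currfunc "("
        let currfunc := if idx ≠ -1 then PySem.Str.slice currfunc none (some idx) else currfunc
        (currfunc, true, st.2.2.1, st.2.2.2)
      else st
    else st
  else
    let p0 := PySem.Str.slice (PySem.List.pyGetD parts 0 "") none (some 3)
    if p0 = "\"\"\"" ∨ p0 = "'''" then
      ("", false, st.2.2.1 ++ [st.1], st.2.2.2)
    else
      ("", false, st.2.2.1, st.2.2.2 ++ [st.1])

def func_reader (content : String) : List (List String) :=
  let r := (pvSplit content "\n").foldl frA_step ("", false, [], [])
  [r.2.2.1, r.2.2.2]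

-- ===== PORT B =====
-- Source B's line tests and name extraction, as named helpers
def frB_isdef (l : String) : Bool :=
  let parts := pvSplit (PySem.Str.strip l) " "
  PySem.List.pyGetD parts 0 "" == "def" && parts.length ≥ 2

def frB_name (l : String) : String :=
  let name := PySem.List.pyGetD (pvSplit (PySem.Str.strip l) " ") 1 ""
  let idx := PySem.Str.find name "("
  if idx ≠ -1 then PySem.Str.slice name none (some idx) else name

def frB_isdoc (l2 : String) : Bool :=
  let tok := PySem.Str.slice (PySem.List.pyGetD (pvSplit (PySem.Str.strip l2) " ") 0 "") none (some 3)
  tok == "\"\"\"" || tok == "'''"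

-- Source B's while loop over the index i: i+2 on a matched def with a following line, else i+1
def frB_loop : List String → List String → List String → List String × List String
  | [], wd, wod => (wd, wod)
  | l :: rest, wd, wod =>
    if frB_isdef l then
      match rest with
      | [] => (wd, wod)
      | l2 :: rest2 =>
        if frB_isdoc l2 then frB_loop rest2 (wd ++ [frB_name l]) wod
        else frB_loop rest2 wd (wod ++ [frB_name l])
    else frB_loop rest wd wod

def func_reader_alt (content : String) : List (List String) :=
  let r := frB_loop (pvSplit content "\n") [] []
  [r.1, r.2]

-- ===== PRECONDITION & SPEC =====
def Spec_func_reader (content : String) (out : List (List String)) : Prop := out = func_reader_alt content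
instance (content : String) (out : List (List String)) : Decidable (Spec_func_reader content out) := by unfold Spec_func_reader; infer_instance

-- ===== CLAIM (what is proved, stated in full; the proofs are below) =====
def Claim_equal_func_reader : Prop := ∀ (content : String), Dom_func_reader content → Spec_func_reader content (func_reader content)

-- ===== LEMMAS AND PROOFS =====

-- rfl-unfoldings of B's loop (the generic cons case is split below in fold_eq_loop)
lemma frB_loop_nil (wd wod : List String) : frB_loop [] wd wod = (wd, wod) := rfl

lemma frB_loop_one (l : String) (wd wod : List String) :
    frB_loop [l] wd wod = if frB_isdef l then (wd, wod) else frB_loop [] wd wod := rfl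

lemma frB_loop_two (l l2 : String) (r wd wod : List String) :
    frB_loop (l :: l2 :: r) wd wod =
      if frB_isdef l then
        (if frB_isdoc l2 then frB_loop r (wd ++ [frB_name l]) wod
         else frB_loop r wd (wod ++ [frB_name l]))
      else frB_loop (l2 :: r) wd wod := rfl

-- strip = lstrip ∘ rstrip (Python strips both ends; the order is immaterial)
lemma dropWhile_rev_comm (p : Char → Bool) (xs : List Char) :
    List.dropWhile p (List.dropWhile p xs.reverse).reverse =
      (List.dropWhile p (List.dropWhile p xs).reverse).reverse := by
  induction xs with
  | nil => simp
  | cons x xs ih =>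
    rcases hR : List.dropWhile p xs.reverse with _ | ⟨r, rs⟩
    · have hxs : List.dropWhile p xs = [] := by
        rw [List.dropWhile_eq_nil_iff] at hR ⊢
        intro y hy; exact hR y (List.mem_reverse.mpr hy)
      by_cases hx : p x = true
      · simp [List.dropWhile_append, hR, hx]
        simp [hxs]
      · simp [List.dropWhile_append, hR, hx]
    · by_cases hx : p x = true
      · simpa [List.dropWhile_append, hR, hx] using ih
      · simp [List.dropWhile_append, hR, hx]

lemma strip_eq_lstrip_rstrip (s : String) :
    PySem.Str.strip s = PySem.Str.lstrip (PySem.Str.rstrip s) := by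
  simp only [PySem.Str.strip, PySem.Str.lstrip, PySem.Str.rstrip,
    PySem.Chars.strip, PySem.Chars.lstrip, PySem.Chars.rstrip, String.toList_ofList]
  rw [dropWhile_rev_comm]

-- how A's step acts from the non-searching state, on a line that is not a usable 'def'
lemma frA_step_nodef (c : String) (wd wod : List String) (l : String)
    (h : frB_isdef l = false) :
    frA_step (c, false, wd, wod) l = (c, false, wd, wod) := by
  by_cases hd : PySem.List.pyGetD (pvSplit (PySem.Str.strip l) " ") 0 "" = "def"
  · have hl : ¬ (pvSplit (PySem.Str.strip l) " ").length ≥ 2 := by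
      intro hl; simp [frB_isdef, hd, hl] at h
    simp [frA_step, ← strip_eq_lstrip_rstrip, hd, hl]
  · simp [frA_step, ← strip_eq_lstrip_rstrip, hd]

-- … and on a 'def' line with a name: it stores the name and starts searching
lemma frA_step_def (c : String) (wd wod : List String) (l : String)
    (h : frB_isdef l = true) :
    frA_step (c, false, wd, wod) l = (frB_name l, true, wd, wod) := by
  simp only [frB_isdef, Bool.and_eq_true, beq_iff_eq, decide_eq_true_eq] at h
  simp [frA_step, frB_name, ← strip_eq_lstrip_rstrip, h.1, h.2]

-- from the searching state it classifies the line and resets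
lemma frA_step_doc (c : String) (wd wod : List String) (l2 : String) :
    frA_step (c, true, wd, wod) l2 =
      if frB_isdoc l2 then ("", false, wd ++ [c], wod) else ("", false, wd, wod ++ [c]) := by
  by_cases h : frB_isdoc l2 = true
  · have h' := h
    simp only [frB_isdoc, Bool.or_eq_true, beq_iff_eq] at h'
    rw [if_pos h]
    simp [frA_step, ← strip_eq_lstrip_rstrip, h']
  · have h' := h
    simp only [frB_isdoc, Bool.or_eq_true, beq_iff_eq, not_or] at h'
    rw [if_neg h]
    simp [frA_step, ← strip_eq_lstrip_rstrip, h'.1, h'.2]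

-- the loop invariant: A's fold from a non-searching state computes exactly B's loop,
-- whatever string happens to be left in currfunc
lemma fold_eq_loop (lines wd wod : List String) : ∀ c0 : String,
    (((lines.foldl frA_step (c0, false, wd, wod)).2.2.1,
      (lines.foldl frA_step (c0, false, wd, wod)).2.2.2) : List String × List String) =
      frB_loop lines wd wod := by
  induction lines, wd, wod using frB_loop.induct with
  | case1 wd wod => intro c0; rfl
  | case2 l wd wod h =>
    intro c0
    rw [List.foldl_cons, List.foldl_nil, frA_step_def c0 wd wod l h, frB_loop_one, if_pos h]
  | case3 l wd wod h l2 rest2 hdoc ih =>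
    intro c0
    rw [List.foldl_cons, frA_step_def c0 wd wod l h, List.foldl_cons, frA_step_doc,
      if_pos hdoc, frB_loop_two, if_pos h, if_pos hdoc]
    exact ih ""
  | case4 l wd wod h l2 rest2 hdoc ih =>
    intro c0
    rw [List.foldl_cons, frA_step_def c0 wd wod l h, List.foldl_cons, frA_step_doc,
      if_neg hdoc, frB_loop_two, if_pos h, if_neg hdoc]
    exact ih ""
  | case5 l rest wd wod h ih =>
    intro c0
    rw [Bool.not_eq_true] at h
    rcases rest with _ | ⟨l2, r⟩
    · rw [List.foldl_cons, List.foldl_nil, frA_step_nodef c0 wd wod l h, frB_loop_one,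
        if_neg (by simp [h]), frB_loop_nil]
    · rw [List.foldl_cons, frA_step_nodef c0 wd wod l h, frB_loop_two, if_neg (by simp [h])]
      exact ih c0

-- ===== VERDICT (by name: the statement is the Claim_ definition above) =====
theorem func_reader_spec : Claim_equal_func_reader := by
  intro content _
  unfold Spec_func_reader func_reader func_reader_alt
  have h := fold_eq_loop (pvSplit content "\n") [] [] ""
  rw [← h]
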